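-- pv_equiv track=rewrite | github.com/sy2384/su_irreps | su3_irrep_CG.py | row_length_check
-- ===== SOURCE A (Python) =====
-- def row_length_check(matrix):
--     if len(matrix) == 0:
--         return True
--     else:
--         row_lengths = [len(matrix[i]) for i in range(len(matrix))]
--         # row length check
--         for i in range(len(matrix) - 1):
--             if row_lengths[i] < row_lengths[i + 1]:
--                 return False
--     return True
-- ===== SOURCE B (Python) =====
-- def row_length_check(matrix):
--     lengths = [len(r) for r in matrix]
--     return lengths == sorted(lengths, reverse=True)
-- ===== Notes on version B (the rewrite author's own statement) =====
-- stated objective: simpler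
-- what changed: Replaces the index-based adjacent-pair scan with a single comparison of the row-length list against its descending-sorted copy.
import Mathlib
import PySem

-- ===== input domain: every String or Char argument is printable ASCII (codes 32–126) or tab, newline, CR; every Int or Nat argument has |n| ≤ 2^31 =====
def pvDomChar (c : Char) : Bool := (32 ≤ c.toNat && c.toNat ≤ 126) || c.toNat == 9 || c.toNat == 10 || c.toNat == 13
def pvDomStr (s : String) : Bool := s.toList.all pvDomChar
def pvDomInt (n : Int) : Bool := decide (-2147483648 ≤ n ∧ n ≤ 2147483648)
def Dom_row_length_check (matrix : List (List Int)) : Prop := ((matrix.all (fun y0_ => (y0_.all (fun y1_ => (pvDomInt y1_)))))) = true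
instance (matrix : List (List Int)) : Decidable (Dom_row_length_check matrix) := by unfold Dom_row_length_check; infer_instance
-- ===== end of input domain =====

-- B replaces A's adjacent-pair index scan with one comparison of the row-length list against its descending-sorted copy (objective: simpler).


-- ===== PORT A =====
-- adjacent-pair scan of A's loop 'for i in range(len(matrix)-1)': structural recursion over the length list
def rlcLoop : List Int → Bool
  | a :: b :: t => if a < b then false else rlcLoop (b :: t)
  | _ => true

-- port of A: the comprehension [len(matrix[i]) for i in range(len(matrix))] visits each row in order → map
def row_length_check (matrix : List (List Int)) : Bool :=
  if matrix.length == 0 then true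
  else
    let row_lengths := matrix.map (fun r => (r.length : Int))
    rlcLoop row_lengths

-- ===== PORT B =====
-- B compares the length list with its descending-sorted copy
def row_length_check_alt (matrix : List (List Int)) : Bool :=
  let lengths := matrix.map (fun r => (r.length : Int))
  lengths == PySem.List.sorted lengths (fun x => x) true

-- ===== PRECONDITION & SPEC =====
def Spec_row_length_check (matrix : List (List Int)) (out : Bool) : Prop := out = row_length_check_alt matrix
instance (matrix : List (List Int)) (out : Bool) : Decidable (Spec_row_length_check matrix out) := by unfold Spec_row_length_check; infer_instance

-- ===== CLAIM (what is proved, stated in full; the proofs are below) =====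
def Claim_equal_row_length_check : Prop := ∀ (matrix : List (List Int)), Dom_row_length_check matrix → Spec_row_length_check matrix (row_length_check matrix)

-- ===== LEMMAS AND PROOFS =====

-- ===== VERDICT (by name: the statement is the Claim_ definition above) =====
lemma rlcLoop_iff_pairwise : ∀ ls : List Int, rlcLoop ls = true ↔ ls.Pairwise (fun a b => b ≤ a)
  | [] => by simp [rlcLoop]
  | [a] => by simp [rlcLoop]
  | a :: b :: u => by
    have ih := rlcLoop_iff_pairwise (b :: u)
    constructor
    · intro h
      unfold rlcLoop at h
      split_ifs at h with hab
      have hp := ih.mp h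
      refine List.pairwise_cons.mpr ⟨?_, hp⟩
      intro x hx
      rcases List.mem_cons.mp hx with rfl | hxu
      · omega
      · have := (List.pairwise_cons.mp hp).1 x hxu
        omega
    · intro hp
      have h1 := (List.pairwise_cons.mp hp).1 b (List.mem_cons_self ..)
      unfold rlcLoop
      rw [if_neg (by omega)]
      exact ih.mpr (List.pairwise_cons.mp hp).2

lemma rlcLoop_eq_sorted (ls : List Int) :
    rlcLoop ls = (ls == PySem.List.sorted ls (fun x => x) true) := by
  by_cases h : rlcLoop ls = true
  · rw [h]
    have := PySem.List.sorted_rev_eq_self_of_pairwise (xs := ls) (key := fun x => x)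
      ((rlcLoop_iff_pairwise ls).mp h)
    simp [this]
  · rw [Bool.not_eq_true] at h
    rw [h]
    symm
    rw [beq_eq_false_iff_ne]
    intro heq
    apply absurd ((rlcLoop_iff_pairwise ls).mpr _) (by simp [h])
    have := PySem.List.sorted_pairwise_rev (xs := ls) (key := fun x => x)
    rwa [← heq] at this

theorem row_length_check_spec : Claim_equal_row_length_check := by
  intro matrix _
  unfold Spec_row_length_check row_length_check row_length_check_alt
  by_cases h : matrix = []
  · subst h; decide
  · rw [if_neg (by simpa using h)]
    exact rlcLoop_eq_sorted _
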